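-- pv_equiv track=rewrite | github.com/StepanHardy/simple_replacement_decoder | decoder.py | get_comparison
-- ===== SOURCE A (Python) =====
-- znaki = [',', '-', '.', '!', '"', ':', ";", '?', '1', '2', '3', '4', '5', '6', '7', '8', '9', '0', '(', ')', '']  #
--
-- def map_word(word):  # Создание карты слова
--     d = {}
--     for i in list(word):
--         if d.get(i):
--             d[i] += 1
--         else:
--             d[i] = 1
--     return d
--
-- def map_comparison(key, val):  # Сравнение карт слов
--     otv = len(key)
--     if len(key) != len(val):
--         return False
--     for i in range(len(key)):
--         if list(key.values())[i] == list(val.values())[i]: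
--             otv -= 1
--     if otv == 0:
--         return True
--     else:
--         return False
--
-- def get_comparison(analis, decod):  # Поиск схожих слов
--     dic = {}
--
--     for i in decod:  # Поиск схожих по длине
--         arr = []
--         for s in analis:
--             if i in znaki:
--                 break
--             if len(i) == len(s) and not dic.get(i) and s not in arr:
--                 arr.append(s)
--         if len(arr) != 0:
--             dic.update({i: arr})
--     p = []
--     for key, value in dic.items():  # Поиск схожих по картам
--         arr = []
--         d_key = map_word(key)
--         for v in value:
--             d_val = map_word(v)
--             if map_comparison(d_key, d_val):
--                 arr.append(v)
--         if len(arr) == 1: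
--             dic[key] = arr[0]
--         else:
--             p.append(key)
--     for s in p:  # удаление лишних слов
--         dic.pop(s)
--     return dic
-- ===== SOURCE B (Python) =====
-- # B: index analis once by letter-frequency signature (counts in first-occurrence order);
-- # a decoded word matches exactly the analysis words sharing its signature, so each decod
-- # word is answered by one dict lookup instead of scanning analis and re-comparing maps.
-- znaki = [',', '-', '.', '!', '"', ':', ";", '?', '1', '2', '3', '4', '5', '6', '7', '8', '9', '0', '(', ')', '']
--
-- def sig(word):
--     c = {}
--     for ch in word:
--         c[ch] = c.get(ch, 0) + 1
--     return tuple(c.values())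
--
-- def get_comparison(analis, decod):
--     index = {}
--     for s in analis:
--         k = sig(s)
--         b = index.get(k)
--         if b is None:
--             index[k] = [s]
--         elif s not in b:
--             b.append(s)
--     zn = set(znaki)
--     res = {}
--     for w in decod:
--         if w in zn:
--             continue
--         m = index.get(sig(w))
--         if m is not None and len(m) == 1:
--             res[w] = m[0]
--     return res
-- ===== Notes on version B (the rewrite author's own statement) =====
-- stated objective: faster
-- what changed: B indexes analis once by letter-frequency signature (dict keyed on the tuple of counts in first-occurrence order) and answers each decoded word by a single lookup, instead of A's per-word scan of analis followed by a pairwise positional comparison of frequency maps.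
import Mathlib
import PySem

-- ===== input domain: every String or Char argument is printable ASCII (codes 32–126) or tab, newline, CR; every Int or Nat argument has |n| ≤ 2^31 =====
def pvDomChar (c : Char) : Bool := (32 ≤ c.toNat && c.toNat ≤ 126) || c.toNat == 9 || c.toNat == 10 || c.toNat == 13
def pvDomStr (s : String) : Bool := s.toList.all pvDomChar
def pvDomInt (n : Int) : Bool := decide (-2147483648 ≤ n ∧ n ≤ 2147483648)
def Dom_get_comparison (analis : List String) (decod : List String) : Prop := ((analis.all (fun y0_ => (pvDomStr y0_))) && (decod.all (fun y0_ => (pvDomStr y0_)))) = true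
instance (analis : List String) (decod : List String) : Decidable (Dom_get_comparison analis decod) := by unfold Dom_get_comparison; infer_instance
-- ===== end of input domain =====

-- B replaces A's per-word scan of `analis` plus pairwise frequency-map comparison by a
-- single index of `analis` keyed on the letter-frequency signature, answered by one lookup
-- per decoded word (objective: faster).

-- ===== PORT A =====
-- module constant znaki (shared context of both versions)
def znaki : List String :=
  [",", "-", ".", "!", "\"", ":", ";", "?", "1", "2", "3", "4", "5", "6", "7", "8", "9", "0", "(", ")", ""]

-- map_word: d = {}; for i in list(word): if d.get(i): d[i] += 1 else: d[i] = 1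
def map_word (word : String) : PySem.Dict Char Int :=
  word.toList.foldl
    (fun d i =>
      match d.get? i with
      | some v => if v ≠ 0 then d.insert i (v + 1) else d.insert i 1   -- `if d.get(i):` (truthy int)
      | none => d.insert i 1)
    PySem.Dict.empty

-- map_comparison, step for step (otv counter over range(len(key)))
def map_comparison (key val : PySem.Dict Char Int) : Bool :=
  let otv : Int := (key.size : Int)
  if (key.size : Int) ≠ (val.size : Int) then false
  else
    let otv := (PySem.List.pyRange 0 (key.size : Int) 1).foldl
      (fun otv i =>
        if PySem.List.pyGetD key.values i 0 == PySem.List.pyGetD val.values i 0 then otv - 1 else otv)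
      otv
    if otv == 0 then true else false

-- A's dict holds lists during phase 1 and strings after phase 2: value type is the sum
-- Python truthiness of a dict value (list: nonempty; str: nonempty)
def pvTruthyVal : List String ⊕ String → Bool
  | .inl l => !l.isEmpty
  | .inr s => !s.toList.isEmpty

-- `not dic.get(i)`
def pvNotGet (dic : PySem.Dict String (List String ⊕ String)) (i : String) : Bool :=
  match dic.get? i with
  | none => true
  | some v => !pvTruthyVal v

-- inner `for s in analis: if i in znaki: break; if …: arr.append(s)` (break = return arr)
def pvLenScan (i : String) (dic : PySem.Dict String (List String ⊕ String)) :
    List String → List String → List String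
  | arr, [] => arr
  | arr, s :: rest =>
    if znaki.contains i then arr
    else pvLenScan i dic
      (if PySem.Str.len i == PySem.Str.len s && pvNotGet dic i && !arr.contains s
       then arr ++ [s] else arr) rest

def get_comparison (analis : List String) (decod : List String) : List (String × String) :=
  let dic := decod.foldl
    (fun dic i =>
      let arr := pvLenScan i dic [] analis
      if arr.length ≠ 0 then dic.insert i (Sum.inl arr) else dic)
    PySem.Dict.empty
  let st := dic.items.foldl
    (fun (st : PySem.Dict String (List String ⊕ String) × List String) kv =>
      match kv.2 with
      | Sum.inl value =>
        let d_key := map_word kv.1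
        let arr := value.foldl
          (fun arr v => if map_comparison d_key (map_word v) then arr ++ [v] else arr) []
        if arr.length == 1 then (st.1.insert kv.1 (Sum.inr (PySem.List.pyGetD arr 0 "")), st.2)
        else (st.1, st.2 ++ [kv.1])
      | Sum.inr _ => st)   -- unreachable: phase 1 stores only lists
    (dic, ([] : List String))
  let dic2 := st.2.foldl (fun d s => d.erase s) st.1
  dic2.items.map (fun kv => (kv.1, match kv.2 with | Sum.inr s => s | Sum.inl _ => ""))  -- inl unreachable

-- ===== PORT B =====
-- sig: counts of each letter in first-occurrence order (c[ch] = c.get(ch, 0) + 1; tuple(c.values()))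
def sig (word : String) : List Int :=
  (word.toList.foldl (fun c ch => c.modify ch 0 (· + 1)) PySem.Dict.empty).values

def get_comparison_alt (analis : List String) (decod : List String) : List (String × String) :=
  let index := analis.foldl
    (fun index s =>
      let k := sig s
      match index.get? k with
      | none => index.insert k [s]
      | some b => if b.contains s then index else index.insert k (b ++ [s]))
    PySem.Dict.empty
  let zn := PySem.Set.ofList znaki
  let res := decod.foldl
    (fun res w =>
      if PySem.Set.contains zn w then res
      else
        match index.get? (sig w) with
        | some m => if m.length == 1 then res.insert w (PySem.List.pyGetD m 0 "") else res
        | none => res)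
    PySem.Dict.empty
  res.items

-- ===== PRECONDITION & SPEC =====
def Spec_get_comparison (analis : List String) (decod : List String) (out : List (String × String)) : Prop := out = get_comparison_alt analis decod
instance (analis : List String) (decod : List String) (out : List (String × String)) : Decidable (Spec_get_comparison analis decod out) := by unfold Spec_get_comparison; infer_instance

-- ===== CLAIM (what is proved, stated in full; the proofs are below) =====
def Claim_equal_get_comparison : Prop := ∀ (analis : List String) (decod : List String), Dom_get_comparison analis decod → Spec_get_comparison analis decod (get_comparison analis decod)

-- ===== LEMMAS AND PROOFS =====

-- canonical description shared by both proofs: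
-- pvLsig analis w = the distinct analysis words with w's letter-frequency signature
def pvLsig (analis : List String) (w : String) : List String :=
  (PySem.Set.ofList analis).filter (fun s => sig s == sig w)

def pvGood (analis : List String) (w : String) : Bool :=
  !PySem.Set.contains (PySem.Set.ofList znaki) w && ((pvLsig analis w).length == 1)

def pvCanon (analis : List String) (decod : List String) : List (String × String) :=
  (PySem.Set.ofList (decod.filter (pvGood analis))).map
    (fun w => (w, PySem.List.pyGetD (pvLsig analis w) 0 ""))

def pvDlen (analis : List String) (w : String) : List String :=
  (PySem.Set.ofList analis).filter (fun s => PySem.Str.len w == PySem.Str.len s)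

def pvGoodA (analis : List String) (w : String) : Bool :=
  !znaki.contains w && !(pvDlen analis w).isEmpty

def pvM (g : String → List String) (w : String) : List String :=
  (g w).filter (fun v => map_comparison (map_word w) (map_word v))

def pvQ (g : String → List String) (w : String) : Bool := (pvM g w).length == 1

def pvH (g : String → List String) (w : String) : String := PySem.List.pyGetD (pvM g w) 0 ""

-- get? of a dict whose items are a map over a Nodup key list

theorem pvGet?_mkMap {ν : Type} (S : List String) (f : String → ν) (hS : S.Nodup) (w : String) :
    (PySem.Dict.mk (S.map (fun x => (x, f x)))).get? w
      = if w ∈ S then some (f w) else none := by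
  induction S with
  | nil => simp [PySem.Dict.get?]
  | cons a S ih =>
    simp only [List.map_cons, PySem.Dict.get?_mk_cons]
    rcases List.nodup_cons.mp hS with ⟨ha, hS'⟩
    by_cases h : a = w
    · subst h; simp
    · simp only [beq_iff_eq, h, if_false, ih hS', List.mem_cons]
      have : ¬ w = a := fun e => h e.symm
      simp [this]

theorem pvOfList_filter {α : Type} [BEq α] [LawfulBEq α] (p : α → Bool) (xs : List α) :
    PySem.Set.ofList (xs.filter p) = (PySem.Set.ofList xs).filter p := by
  induction xs using List.reverseRecOn with
  | nil => rfl
  | append_singleton xs x ih =>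
    rw [List.filter_append, PySem.Set.ofList_append_singleton]
    by_cases hp : p x
    · simp only [List.filter_cons, hp, List.filter_nil, if_true]
      rw [PySem.Set.ofList_append_singleton, ih]
      by_cases hm : x ∈ PySem.Set.ofList xs
      · rw [PySem.Set.add_of_mem hm, PySem.Set.add_of_mem]
        simp [List.mem_filter, hm, hp]
      · rw [PySem.Set.add_of_not_mem hm, PySem.Set.add_of_not_mem, List.filter_append]
        · simp [hp]
        · simp [List.mem_filter, hm]
    · have hfx : List.filter p [x] = ([] : List α) := by simp [hp]
      rw [hfx, List.append_nil, ih]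
      by_cases hm : x ∈ PySem.Set.ofList xs
      · rw [PySem.Set.add_of_mem hm]
      · rw [PySem.Set.add_of_not_mem hm, List.filter_append]
        simp [hp]

theorem pvMap_word_eq (w : String) : map_word w = PySem.Dict.counter w.toList := by
  rw [PySem.Dict.counter_eq_foldl]
  unfold map_word
  congr 1
  funext d i
  rw [PySem.Dict.modify]
  cases h : d.get? i with
  | none =>
    show d.insert i 1 = d.insert i (d.getD i 0 + 1)
    rw [PySem.Dict.getD_eq_get?_getD, h]; norm_num
  | some v =>
    show (if v ≠ 0 then d.insert i (v + 1) else d.insert i 1) = d.insert i (d.getD i 0 + 1)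
    rw [PySem.Dict.getD_eq_get?_getD, h]
    by_cases hv : v = 0
    · subst hv; norm_num
    · simp [hv]


-- Set.ofList commutes with filter

-- map_word is Counter


-- the signature sums to the word length


theorem pvSig_eq_counter (w : String) : sig w = (PySem.Dict.counter w.toList).values := by
  rw [PySem.Dict.counter_eq_foldl]; rfl

theorem pvCounter_values (l : List Char) :
    (PySem.Dict.counter l).values = (PySem.Set.ofList l).map (fun k => ((l.count k : Nat) : Int)) := by
  rw [PySem.Dict.values, PySem.Dict.items_counter, List.map_map]
  rfl

theorem pvSig_sum (w : String) : (sig w).sum = (w.toList.length : Int) := by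
  rw [pvSig_eq_counter, pvCounter_values]
  have hperm : (PySem.Set.ofList w.toList).Perm w.toList.dedup := by
    rw [List.perm_ext_iff_of_nodup (PySem.Set.nodup_ofList _) (List.nodup_dedup _)]
    intro a; rw [PySem.Set.mem_ofList, List.mem_dedup]
  have h1 : ((PySem.Set.ofList w.toList).map (fun k => ((w.toList.count k : Nat) : Int))).sum
      = ((w.toList.dedup).map (fun k => ((w.toList.count k : Nat) : Int))).sum :=
    (hperm.map _).sum_eq
  rw [h1, ← List.sum_map_count_dedup_eq_length w.toList]
  simp [Function.comp_def]

theorem pvSig_len {a b : String} (h : sig a = sig b) : a.toList.length = b.toList.length := by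
  have ha := pvSig_sum a
  have hb := pvSig_sum b
  rw [h, hb] at ha
  exact_mod_cast ha.symm

-- the otv loop counts down once per equal position
theorem pvFoldCount (u v : List Int) (c : Int) (n : Nat) :
    (List.range n).foldl (fun o k => if u.getD k 0 == v.getD k 0 then o - 1 else o) c
      = c - ((List.range n).countP (fun k => u.getD k 0 == v.getD k 0) : Int) := by
  induction n generalizing c with
  | zero => simp
  | succ n ih =>
    rw [List.range_succ, List.foldl_append, List.countP_append, ih]
    simp only [List.foldl_cons, List.foldl_nil, List.countP_cons, List.countP_nil]
    by_cases h : u.getD n 0 == v.getD n 0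
    · simp only [h, if_pos]
      push_cast; ring
    · simp only [h, if_neg, Bool.false_eq_true, not_false_iff]
      push_cast; ring

-- map_comparison is equality of the value lists
theorem pvMc_eq (key val : PySem.Dict Char Int) :
    map_comparison key val = (key.values == val.values) := by
  unfold map_comparison
  have hk : key.values.length = key.size := by simp [PySem.Dict.values, PySem.Dict.size]
  have hv : val.values.length = val.size := by simp [PySem.Dict.values, PySem.Dict.size]
  by_cases hne : (key.size : Int) ≠ (val.size : Int)
  · rw [if_pos hne]
    have : key.values ≠ val.values := by
      intro e
      exact hne (by rw [← hk, ← hv, e])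
    simp [this]
  · rw [if_neg hne]
    have hsz : key.size = val.size := by exact_mod_cast not_not.mp hne
    rw [PySem.List.pyRange_one]
    simp only [Int.sub_zero, Int.toNat_natCast, List.foldl_map]
    have hstep : ∀ (o : Int) (k : Nat),
        (if PySem.List.pyGetD key.values ((0 : Int) + (k : Int)) 0 == PySem.List.pyGetD val.values ((0:Int) + (k:Int)) 0 then o - 1 else o)
          = (if key.values.getD k 0 == val.values.getD k 0 then o - 1 else o) := by
      intro o k; rw [Int.zero_add, PySem.List.pyGetD_natCast, PySem.List.pyGetD_natCast]
    have hfg : List.foldl (fun (o : Int) (k : Nat) => if PySem.List.pyGetD key.values ((0:Int) + (k:Int)) 0 == PySem.List.pyGetD val.values ((0:Int) + (k:Int)) 0 then o - 1 else o) (key.size : Int) (List.range key.size)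
        = List.foldl (fun (o : Int) (k : Nat) => if key.values.getD k 0 == val.values.getD k 0 then o - 1 else o) (key.size : Int) (List.range key.size) :=
      PySem.List.foldl_congr_mem _ _ _ _ (fun acc x _ => hstep acc x)
    rw [hfg, pvFoldCount]
    by_cases heq : key.values = val.values
    · have hall : ∀ k ∈ List.range key.size, (key.values.getD k 0 == val.values.getD k 0) = true := by
        intro k _; rw [heq]; exact beq_self_eq_true _
      have hcnt : (List.range key.size).countP (fun k => key.values.getD k 0 == val.values.getD k 0) = key.size := by
        rw [List.countP_eq_length.mpr hall, List.length_range]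
      rw [hcnt]
      simp [heq]
    · have hcle : (List.range key.size).countP (fun k => key.values.getD k 0 == val.values.getD k 0) ≤ key.size := by
        calc (List.range key.size).countP (fun k => key.values.getD k 0 == val.values.getD k 0)
            ≤ (List.range key.size).length := List.countP_le_length
          _ = key.size := List.length_range
      have hne2 : (List.range key.size).countP (fun k => key.values.getD k 0 == val.values.getD k 0) ≠ key.size := by
        intro hc
        apply heq
        have hall := List.countP_eq_length.mp (by rw [hc, List.length_range])
        apply List.ext_getElem (by rw [hk, hv, hsz])
        intro i h1 h2
        have hi : i < key.size := by rwa [hk] at h1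
        have hx := hall i (List.mem_range.mpr hi)
        simp only [beq_iff_eq] at hx
        rwa [List.getD_eq_getElem _ _ h1, List.getD_eq_getElem _ _ h2] at hx
      have hcond : (((key.size : Int) - ((List.range key.size).countP (fun k => key.values.getD k 0 == val.values.getD k 0) : Nat) == 0) = false) := by
        simp only [beq_eq_false_iff_ne, ne_eq, sub_eq_zero]
        intro hc
        exact hne2 (by exact_mod_cast hc.symm)
      rw [hcond]
      simp [heq]



theorem pvMc_sig (a b : String) :
    map_comparison (map_word a) (map_word b) = (sig a == sig b) := by
  rw [pvMap_word_eq, pvMap_word_eq, pvMc_eq, ← pvSig_eq_counter, ← pvSig_eq_counter]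

-- contains on a dict whose items are a map over a key list
theorem pvAny_beq (S : List String) (w : String) : (S.any (fun x => x == w)) = decide (w ∈ S) := by
  induction S with
  | nil => simp
  | cons a S ih =>
    have hb : (a == w) = decide (w = a) := by
      by_cases h : a = w
      · subst h; simp
      · simp [h, Ne.symm h]
    simp [List.any_cons, ih, hb]

theorem pvContains_mkMap {ν : Type} (S : List String) (f : String → ν) (w : String) :
    (PySem.Dict.mk (S.map (fun x => (x, f x)))).contains w = decide (w ∈ S) := by
  show (S.map (fun x => (x, f x))).any (fun p => p.1 == w) = decide (w ∈ S)
  rw [List.any_map]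
  exact pvAny_beq S w

-- ============ B side ============

def pvIdxFold (analis : List String) : PySem.Dict (List Int) (List String) :=
  analis.foldl (fun index s =>
    match index.get? (sig s) with
    | none => index.insert (sig s) [s]
    | some b => if b.contains s then index else index.insert (sig s) (b ++ [s])) PySem.Dict.empty

-- the signature index holds exactly the distinct analysis words per signature
theorem pvIndex_get? (analis : List String) (k : List Int) :
    (pvIdxFold analis).get? k
      = (if ((PySem.Set.ofList analis).filter (fun s => sig s == k)).isEmpty then none
         else some ((PySem.Set.ofList analis).filter (fun s => sig s == k))) := by
  induction analis using List.reverseRecOn generalizing k with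
  | nil => simp [pvIdxFold, PySem.Set.ofList_nil, PySem.Dict.get?, PySem.Dict.empty]
  | append_singleton xs s ih =>
    have hstep : pvIdxFold (xs ++ [s])
        = (match (pvIdxFold xs).get? (sig s) with
           | none => (pvIdxFold xs).insert (sig s) [s]
           | some b => if b.contains s then pvIdxFold xs else (pvIdxFold xs).insert (sig s) (b ++ [s])) := by
      unfold pvIdxFold
      rw [List.foldl_append, List.foldl_cons, List.foldl_nil]
    rw [hstep, PySem.Set.ofList_append_singleton]
    by_cases hm : s ∈ PySem.Set.ofList xs
    · rw [PySem.Set.add_of_mem hm]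
      have hs : s ∈ (PySem.Set.ofList xs).filter (fun t => sig t == sig s) :=
        List.mem_filter.mpr ⟨hm, by simp⟩
      have hne : ((PySem.Set.ofList xs).filter (fun t => sig t == sig s)).isEmpty = false := by
        rw [List.isEmpty_eq_false_iff_exists_mem]; exact ⟨s, hs⟩
      have hsome : (pvIdxFold xs).get? (sig s)
          = some ((PySem.Set.ofList xs).filter (fun t => sig t == sig s)) := by
        rw [ih (sig s), hne]; rfl
      rw [hsome]
      show (if ((PySem.Set.ofList xs).filter (fun t => sig t == sig s)).contains s
            then pvIdxFold xs
            else (pvIdxFold xs).insert (sig s) ((PySem.Set.ofList xs).filter (fun t => sig t == sig s) ++ [s])).get? k = _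
      rw [List.contains_eq_mem, if_pos (by exact decide_eq_true hs)]
      exact ih k
    · rw [PySem.Set.add_of_not_mem hm, List.filter_append]
      by_cases he : ((PySem.Set.ofList xs).filter (fun t => sig t == sig s)).isEmpty
      · have hnone : (pvIdxFold xs).get? (sig s) = none := by rw [ih (sig s), if_pos he]
        rw [hnone]
        show ((pvIdxFold xs).insert (sig s) [s]).get? k = _
        rw [PySem.Dict.get?_insert]
        by_cases hk : k = sig s
        · rw [if_pos hk, hk]
          have hLk : (PySem.Set.ofList xs).filter (fun t => sig t == sig s) = [] :=
            List.isEmpty_iff.mp he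
          rw [hLk]
          simp
        · rw [if_neg hk, ih k]
          have hcond : (List.filter (fun t => sig t == k) [s]) = [] := by
            simp only [List.filter_cons, List.filter_nil]
            rw [if_neg]
            simp only [beq_iff_eq]
            exact fun e => hk e.symm
          rw [hcond, List.append_nil]
      · have hb : (pvIdxFold xs).get? (sig s)
            = some ((PySem.Set.ofList xs).filter (fun t => sig t == sig s)) := by
          rw [ih (sig s), if_neg he]
        rw [hb]
        have hns : s ∉ (PySem.Set.ofList xs).filter (fun t => sig t == sig s) := by
          intro hmem; exact hm (List.mem_filter.mp hmem).1
        show (if ((PySem.Set.ofList xs).filter (fun t => sig t == sig s)).contains s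
              then pvIdxFold xs
              else (pvIdxFold xs).insert (sig s) ((PySem.Set.ofList xs).filter (fun t => sig t == sig s) ++ [s])).get? k = _
        rw [List.contains_eq_mem, if_neg (by simp [hns])]
        rw [PySem.Dict.get?_insert]
        by_cases hk : k = sig s
        · rw [if_pos hk, hk]
          have hone : (List.filter (fun t => sig t == sig s) [s]) = [s] := by simp
          rw [hone]
          simp
        · rw [if_neg hk, ih k]
          have hcond : (List.filter (fun t => sig t == k) [s]) = [] := by
            simp only [List.filter_cons, List.filter_nil]
            rw [if_neg]
            simp only [beq_iff_eq]
            exact fun e => hk e.symm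
          rw [hcond, List.append_nil]

def pvResFold (analis : List String) (decod : List String) : PySem.Dict String String :=
  decod.foldl (fun res w =>
    if PySem.Set.contains (PySem.Set.ofList znaki) w then res
    else
      match (pvIdxFold analis).get? (sig w) with
      | some m => if m.length == 1 then res.insert w (PySem.List.pyGetD m 0 "") else res
      | none => res) PySem.Dict.empty

theorem pvResItems (analis : List String) (decod : List String) :
    (pvResFold analis decod).items
      = (PySem.Set.ofList (decod.filter (pvGood analis))).map
          (fun w => (w, PySem.List.pyGetD (pvLsig analis w) 0 "")) := by
  induction decod using List.reverseRecOn with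
  | nil => simp [pvResFold, PySem.Dict.empty, PySem.Set.ofList_nil]
  | append_singleton l w ih =>
    have hstep : pvResFold analis (l ++ [w])
        = (if PySem.Set.contains (PySem.Set.ofList znaki) w then pvResFold analis l
           else
             match (pvIdxFold analis).get? (sig w) with
             | some m => if m.length == 1 then (pvResFold analis l).insert w (PySem.List.pyGetD m 0 "") else pvResFold analis l
             | none => pvResFold analis l) := by
      unfold pvResFold
      rw [List.foldl_append, List.foldl_cons, List.foldl_nil]
    rw [hstep, List.filter_append]
    by_cases hz : PySem.Set.contains (PySem.Set.ofList znaki) w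
    · have hP : pvGood analis w = false := by unfold pvGood; rw [hz]; rfl
      rw [if_pos hz, ih, show List.filter (pvGood analis) [w] = [] by simp [hP], List.append_nil]
    · rw [if_neg hz, pvIndex_get? analis (sig w)]
      have hfold : ((PySem.Set.ofList analis).filter (fun s => sig s == sig w)) = pvLsig analis w := rfl
      rw [hfold]
      by_cases he : (pvLsig analis w).isEmpty
      · rw [if_pos he]
        show (pvResFold analis l).items = _
        have hP : pvGood analis w = false := by
          unfold pvGood
          rw [List.isEmpty_iff.mp he]
          simp
        rw [ih, show List.filter (pvGood analis) [w] = [] by simp [hP], List.append_nil]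
      · rw [if_neg he]
        show (if ((pvLsig analis w).length == 1)
              then (pvResFold analis l).insert w (PySem.List.pyGetD (pvLsig analis w) 0 "")
              else pvResFold analis l).items = _
        by_cases h1 : ((pvLsig analis w).length == 1)
        · rw [if_pos h1]
          have hP : pvGood analis w = true := by
            unfold pvGood
            rw [h1]
            have hzn : w ∉ znaki := by simpa using hz
            simp [hzn]
          have hfw : List.filter (pvGood analis) [w] = [w] := by simp [hP]
          rw [hfw, PySem.Set.ofList_append_singleton]
          have hd : pvResFold analis l
              = PySem.Dict.mk ((PySem.Set.ofList (l.filter (pvGood analis))).map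
                  (fun x => (x, PySem.List.pyGetD (pvLsig analis x) 0 ""))) := PySem.Dict.ext ih
          rw [hd]
          by_cases hw : w ∈ PySem.Set.ofList (l.filter (pvGood analis))
          · rw [PySem.Set.add_of_mem hw]
            rw [PySem.Dict.items_insert_of_contains]
            · show (List.map _ (List.map _ _)) = _
              rw [List.map_map]
              apply List.map_congr_left
              intro x hx
              by_cases hxw : x = w
              · subst hxw; simp
              · have : ((x, PySem.List.pyGetD (pvLsig analis x) 0 "").1 == w) = false := by
                  simp [hxw]
                simp only [Function.comp_def, this]
                rfl
            · rw [pvContains_mkMap]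
              exact decide_eq_true hw
          · rw [PySem.Set.add_of_not_mem hw]
            rw [PySem.Dict.items_insert_of_not_contains]
            · show _ = List.map _ (_ ++ [w])
              rw [List.map_append]
              rfl
            · rw [pvContains_mkMap]
              simp [hw]
        · rw [if_neg h1]
          have hP : pvGood analis w = false := by
            unfold pvGood
            simp only [Bool.and_eq_false_iff]
            right
            simpa using h1
          rw [ih, show List.filter (pvGood analis) [w] = [] by simp [hP], List.append_nil]

theorem pvB_eq (analis decod : List String) :
    get_comparison_alt analis decod = pvCanon analis decod := by
  have h : get_comparison_alt analis decod = (pvResFold analis decod).items := rfl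
  rw [h, pvResItems]
  rfl

-- ============ A side ============

-- the inner scan is a no-op when the word is punctuation
theorem pvLenScan_break {i : String} (h : znaki.contains i = true)
    (dic : PySem.Dict String (List String ⊕ String)) (arr l : List String) :
    pvLenScan i dic arr l = arr := by
  cases l with
  | nil => rfl
  | cons s rest => unfold pvLenScan; rw [if_pos h]

-- the inner scan is a no-op when dic already holds a (nonempty) entry for i
theorem pvLenScan_stale {i : String} {dic : PySem.Dict String (List String ⊕ String)}
    (h : pvNotGet dic i = false) (arr l : List String) :
    pvLenScan i dic arr l = arr := by
  induction l generalizing arr with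
  | nil => rfl
  | cons s rest ih =>
    unfold pvLenScan
    split
    · rfl
    · rw [h, show (PySem.Str.len i == PySem.Str.len s && false && !arr.contains s) = false by simp]
      simpa using ih arr

-- the inner scan collects the distinct analysis words of i's length
theorem pvLenScan_main {i : String} {dic : PySem.Dict String (List String ⊕ String)}
    (hz : znaki.contains i = false) (hg : pvNotGet dic i = true) (l : List String) :
    pvLenScan i dic [] l
      = PySem.Set.ofList (l.filter (fun s => PySem.Str.len i == PySem.Str.len s)) := by
  have hfoldl : ∀ (l : List String) (arr : List String),
      pvLenScan i dic arr l
        = l.foldl (fun a s => if PySem.Str.len i == PySem.Str.len s then PySem.Set.add a s else a) arr := by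
    intro l
    induction l with
    | nil => intro arr; rfl
    | cons s rest ih =>
      intro arr
      unfold pvLenScan
      rw [if_neg (by rw [hz]; simp), hg, List.foldl_cons]
      by_cases hc : (PySem.Str.len i == PySem.Str.len s)
      · have hacc : (if PySem.Str.len i == PySem.Str.len s && true && !arr.contains s
            then arr ++ [s] else arr) = PySem.Set.add arr s := by
          by_cases hmem : s ∈ arr
          · have hcon : arr.contains s = true := by
              rw [List.contains_eq_mem]; exact decide_eq_true hmem
            rw [PySem.Set.add_of_mem hmem, if_neg (by rw [hcon]; simp)]
          · have hcon : arr.contains s = false := by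
              rw [List.contains_eq_mem]; exact decide_eq_false hmem
            rw [PySem.Set.add_of_not_mem hmem, if_pos (by rw [hc, hcon]; simp)]
        rw [hacc, if_pos hc]
        exact ih _
      · have hacc : (if PySem.Str.len i == PySem.Str.len s && true && !arr.contains s
            then arr ++ [s] else arr) = arr := by
          rw [if_neg (by rw [show (PySem.Str.len i == PySem.Str.len s) = false from by simpa using hc]; simp)]
        rw [hacc, if_neg hc]
        exact ih _
  rw [hfoldl l [], PySem.List.foldl_if_eq_foldl_filter, ← PySem.Set.ofList_eq_foldl]

def pvStepA (analis : List String) (dic : PySem.Dict String (List String ⊕ String)) (i : String) :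
    PySem.Dict String (List String ⊕ String) :=
  let arr := pvLenScan i dic [] analis
  if arr.length ≠ 0 then dic.insert i (Sum.inl arr) else dic

-- phase 1 builds the dict of first-occurrence candidate lists
theorem pvPhase1 (analis : List String) (decod : List String) :
    (decod.foldl (pvStepA analis) PySem.Dict.empty).items
      = (PySem.Set.ofList (decod.filter (pvGoodA analis))).map
          (fun w => (w, Sum.inl (pvDlen analis w))) := by
  induction decod using List.reverseRecOn with
  | nil => simp [PySem.Dict.empty, PySem.Set.ofList_nil]
  | append_singleton l i ih =>
    rw [List.foldl_append, List.foldl_cons, List.foldl_nil, List.filter_append]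
    have hd : l.foldl (pvStepA analis) PySem.Dict.empty
        = PySem.Dict.mk ((PySem.Set.ofList (l.filter (pvGoodA analis))).map
            (fun w => (w, Sum.inl (pvDlen analis w)))) := PySem.Dict.ext ih
    rw [hd]
    set S := PySem.Set.ofList (l.filter (pvGoodA analis)) with hSdef
    set D := PySem.Dict.mk (S.map (fun w => (w, Sum.inl (pvDlen analis w)))) with hDdef
    have hget : D.get? i = if i ∈ S then some (Sum.inl (pvDlen analis i)) else none :=
      pvGet?_mkMap S _ (PySem.Set.nodup_ofList _) i
    by_cases hz : znaki.contains i
    · have harr : pvLenScan i D [] analis = [] := pvLenScan_break hz D [] analis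
      unfold pvStepA
      rw [harr]
      have hP : pvGoodA analis i = false := by unfold pvGoodA; rw [hz]; rfl
      rw [show List.filter (pvGoodA analis) [i] = [] by simp [hP], List.append_nil]
      rfl
    · have hzf : znaki.contains i = false := by simpa using hz
      by_cases hm : i ∈ S
      · have hPi : pvGoodA analis i = true := by
          have : i ∈ l.filter (pvGoodA analis) := (PySem.Set.mem_ofList _ _).mp (hSdef ▸ hm)
          exact (List.mem_filter.mp this).2
        have hDne : (pvDlen analis i).isEmpty = false := by
          have := hPi
          unfold pvGoodA at this
          rw [hzf] at this
          simpa using this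
        have hng : pvNotGet D i = false := by
          unfold pvNotGet
          rw [hget, if_pos hm]
          show (!pvTruthyVal (Sum.inl (pvDlen analis i))) = false
          rw [show pvTruthyVal (Sum.inl (pvDlen analis i)) = !(pvDlen analis i).isEmpty from rfl, hDne]
          rfl
        have harr : pvLenScan i D [] analis = [] := pvLenScan_stale hng [] analis
        unfold pvStepA
        rw [harr]
        have hfi : List.filter (pvGoodA analis) [i] = [i] := by simp [hPi]
        rw [hfi, PySem.Set.ofList_append_singleton, PySem.Set.add_of_mem hm]
        rfl
      · have hng : pvNotGet D i = true := by
          unfold pvNotGet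
          rw [hget, if_neg hm]
        have harr : pvLenScan i D [] analis = pvDlen analis i := by
          rw [pvLenScan_main hzf hng analis, pvOfList_filter]
          rfl
        unfold pvStepA
        rw [harr]
        by_cases hlen : (pvDlen analis i).length ≠ 0
        · rw [if_pos hlen]
          have hPi : pvGoodA analis i = true := by
            unfold pvGoodA
            rw [hzf]
            have : (pvDlen analis i).isEmpty = false := by
              rw [List.isEmpty_eq_false_iff_exists_mem]
              rcases List.exists_mem_of_length_pos (by omega : 0 < (pvDlen analis i).length) with ⟨x, hx⟩
              exact ⟨x, hx⟩
            rw [this]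
            rfl
          have hfi : List.filter (pvGoodA analis) [i] = [i] := by simp [hPi]
          rw [hfi, PySem.Set.ofList_append_singleton, PySem.Set.add_of_not_mem hm]
          rw [PySem.Dict.items_insert_of_not_contains]
          · rw [List.map_append]; rfl
          · rw [hDdef, pvContains_mkMap]
            simp [hm]
        · rw [if_neg hlen]
          have hPi : pvGoodA analis i = false := by
            unfold pvGoodA
            have : (pvDlen analis i).isEmpty = true := by
              rw [List.isEmpty_iff, ← List.length_eq_zero_iff]
              omega
            rw [this]
            simp
          rw [show List.filter (pvGoodA analis) [i] = [] by simp [hPi], List.append_nil]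

def pvStepB (st : PySem.Dict String (List String ⊕ String) × List String)
    (kv : String × (List String ⊕ String)) :
    PySem.Dict String (List String ⊕ String) × List String :=
  match kv.2 with
  | Sum.inl value =>
    let d_key := map_word kv.1
    let arr := value.foldl
      (fun arr v => if map_comparison d_key (map_word v) then arr ++ [v] else arr) []
    if arr.length == 1 then (st.1.insert kv.1 (Sum.inr (PySem.List.pyGetD arr 0 "")), st.2)
    else (st.1, st.2 ++ [kv.1])
  | Sum.inr _ => st

-- phase 2 over explicit (key, list) pairs: updates singletons, records the rest in p
theorem pvPhase2 (g : String → List String) (T : List String)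
    (d : PySem.Dict String (List String ⊕ String)) (p : List String) :
    (T.map (fun w => (w, Sum.inl (g w)))).foldl pvStepB (d, p)
      = (T.foldl (fun d w => if pvQ g w then d.insert w (Sum.inr (pvH g w)) else d) d,
         p ++ T.filter (fun w => !pvQ g w)) := by
  induction T generalizing d p with
  | nil => simp
  | cons w T ih =>
    rw [List.map_cons, List.foldl_cons, List.foldl_cons, List.filter_cons]
    have harr : (g w).foldl
        (fun arr v => if map_comparison (map_word w) (map_word v) then arr ++ [v] else arr) []
        = pvM g w := by
      rw [PySem.List.foldl_append_if_eq_filter]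
      rfl
    have hstep : pvStepB (d, p) (w, Sum.inl (g w))
        = (if pvQ g w
           then (d.insert w (Sum.inr (pvH g w)), p)
           else (d, p ++ [w])) := by
      unfold pvStepB
      show (if ((g w).foldl (fun arr v => if map_comparison (map_word w) (map_word v) then arr ++ [v] else arr) []).length == 1
            then (d.insert w (Sum.inr (PySem.List.pyGetD ((g w).foldl (fun arr v => if map_comparison (map_word w) (map_word v) then arr ++ [v] else arr) []) 0 "")), p)
            else (d, p ++ [w])) = _
      rw [harr]
      rfl
    rw [hstep]
    by_cases hq : pvQ g w
    · rw [if_pos hq, if_pos hq, ih]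
      have : (!pvQ g w) = false := by rw [hq]; rfl
      rw [this]
      simp
    · have hqf : pvQ g w = false := by simpa using hq
      rw [if_neg hq, if_neg hq, ih]
      have : (!pvQ g w) = true := by rw [hqf]; rfl
      rw [this]
      simp

-- inserting at already-present distinct keys rewrites items in place
theorem pvInsertFold (q : String → Bool) (f : String → List String ⊕ String)
    (T : List String) (d : PySem.Dict String (List String ⊕ String))
    (hnd : d.keys.Nodup) (hT : ∀ w ∈ T, w ∈ d.keys) :
    (T.foldl (fun d w => if q w then d.insert w (f w) else d) d).items
      = d.items.map (fun pr => if decide (pr.1 ∈ T) && q pr.1 then (pr.1, f pr.1) else pr) := by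
  induction T generalizing d with
  | nil => simp
  | cons w T ih =>
    rw [List.foldl_cons]
    by_cases hq : q w
    · rw [if_pos hq]
      have hc : d.contains w = true := by
        rw [PySem.Dict.contains_eq_decide_mem_keys]
        exact decide_eq_true (hT w (List.mem_cons_self))
      have hkeys : (d.insert w (f w)).keys = d.keys := PySem.Dict.keys_insert_of_contains _ _ hc
      rw [ih (d.insert w (f w)) (by rw [hkeys]; exact hnd)
          (by intro v hv; rw [hkeys]; exact hT v (List.mem_cons_of_mem _ hv))]
      rw [PySem.Dict.items_insert_of_contains _ _ hc, List.map_map]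
      apply List.map_congr_left
      intro pr _
      by_cases hw : pr.1 = w
      · have hb : (pr.1 == w) = true := by simp [hw]
        simp only [Function.comp_def, hb, if_pos]
        show (if decide ((w, f w).1 ∈ T) && q (w, f w).1 then ((w, f w).1, f (w, f w).1) else (w, f w))
            = if decide (pr.1 ∈ w :: T) && q pr.1 then (pr.1, f pr.1) else pr
        have h1 : decide (pr.1 ∈ w :: T) = true := decide_eq_true (by rw [hw]; exact List.mem_cons_self)
        rw [h1, hw, hq]
        by_cases hT2 : w ∈ T
        · rw [decide_eq_true hT2]
          rfl
        · rw [decide_eq_false hT2]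
          rfl
      · have hb : (pr.1 == w) = false := by simp [hw]
        simp only [Function.comp_def, hb]
        show (if decide (pr.1 ∈ T) && q pr.1 then (pr.1, f pr.1) else pr)
            = if decide (pr.1 ∈ w :: T) && q pr.1 then (pr.1, f pr.1) else pr
        have : (pr.1 ∈ w :: T) ↔ (pr.1 ∈ T) := by
          constructor
          · intro h; rcases List.mem_cons.mp h with h | h
            · exact absurd h hw
            · exact h
          · exact List.mem_cons_of_mem _
        by_cases hmem : pr.1 ∈ T
        · rw [decide_eq_true hmem, decide_eq_true (this.mpr hmem)]
        · rw [decide_eq_false hmem, decide_eq_false (fun h => hmem (this.mp h))]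
    · have hqf : q w = false := by simpa using hq
      rw [if_neg hq, ih d hnd (fun v hv => hT v (List.mem_cons_of_mem _ hv))]
      apply List.map_congr_left
      intro pr _
      by_cases hw : pr.1 = w
      · rw [hw, hqf]
        simp
      · have : (pr.1 ∈ w :: T) ↔ (pr.1 ∈ T) := by
          constructor
          · intro h; rcases List.mem_cons.mp h with h | h
            · exact absurd h hw
            · exact h
          · exact List.mem_cons_of_mem _
        by_cases hmem : pr.1 ∈ T
        · rw [decide_eq_true hmem, decide_eq_true (this.mpr hmem)]
        · rw [decide_eq_false hmem, decide_eq_false (fun h => hmem (this.mp h))]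

-- popping the recorded keys filters the items
theorem pvEraseFold (p : List String) (d : PySem.Dict String (List String ⊕ String)) :
    (p.foldl (fun d s => d.erase s) d).items
      = d.items.filter (fun pr => !p.contains pr.1) := by
  induction p generalizing d with
  | nil => simp
  | cons x p ih =>
    rw [List.foldl_cons, ih]
    show (List.filter (fun q => !q.1 == x) d.items).filter (fun pr => !p.contains pr.1) = _
    rw [List.filter_filter]
    apply List.filter_congr
    intro pr _
    rw [List.contains_cons]
    by_cases hx : pr.1 = x
    · simp [hx]
    · have h1 : (pr.1 == x) = false := by simp [hx]
      rw [h1]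
      simp

theorem pvZnContains (w : String) : (PySem.Set.ofList znaki).contains w = znaki.contains w := by
  rw [PySem.Set.contains_eq_listContains, List.contains_eq_mem, List.contains_eq_mem]
  by_cases h : w ∈ znaki
  · rw [decide_eq_true h, decide_eq_true ((PySem.Set.mem_ofList _ _).mpr h)]
  · rw [decide_eq_false h, decide_eq_false (fun hh => h ((PySem.Set.mem_ofList _ _).mp hh))]

-- the phase-2 filter over the candidate list is exactly the signature bucket
theorem pvM_eq (analis : List String) (w : String) :
    pvM (pvDlen analis) w = pvLsig analis w := by
  unfold pvM
  rw [show (fun v => map_comparison (map_word w) (map_word v)) = (fun v => sig w == sig v) from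
      funext (fun v => pvMc_sig w v)]
  unfold pvDlen pvLsig
  rw [List.filter_filter]
  apply List.filter_congr
  intro v _
  by_cases hs : sig v = sig w
  · have hlen : w.toList.length = v.toList.length := (pvSig_len hs).symm
    have h3 : (PySem.Str.len w == PySem.Str.len v) = true := by
      rw [PySem.Str.len_eq, PySem.Str.len_eq, hlen]
      simp
    rw [h3]
    simp [hs]
  · have h1 : (sig w == sig v) = false := by
      simp only [beq_eq_false_iff_ne, ne_eq]
      exact fun e => hs e.symm
    rw [h1]
    simp [hs]

-- a singleton signature bucket forces a same-length candidate
theorem pvGood_eq (analis : List String) (w : String) :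
    (pvQ (pvDlen analis) w && pvGoodA analis w) = pvGood analis w := by
  unfold pvGood pvGoodA pvQ
  rw [pvM_eq, pvZnContains]
  by_cases hq : ((pvLsig analis w).length == 1)
  · rw [hq]
    have hne : (pvDlen analis w).isEmpty = false := by
      have hlen : (pvLsig analis w).length = 1 := by simpa using hq
      rcases List.exists_mem_of_length_pos (by omega : 0 < (pvLsig analis w).length) with ⟨v, hv⟩
      rcases List.mem_filter.mp hv with ⟨hvs, hsig⟩
      have hsv : sig v = sig w := by simpa using hsig
      have hlen2 : w.toList.length = v.toList.length := (pvSig_len hsv).symm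
      have hvd : v ∈ pvDlen analis w := by
        apply List.mem_filter.mpr
        refine ⟨hvs, ?_⟩
        rw [PySem.Str.len_eq, PySem.Str.len_eq, hlen2]
        simp
      rw [List.isEmpty_eq_false_iff_exists_mem]
      exact ⟨v, hvd⟩
    rw [hne]
    cases h : znaki.contains w <;> rfl
  · have hqf : ((pvLsig analis w).length == 1) = false := by simpa using hq
    rw [hqf]
    cases h : znaki.contains w <;> cases h2 : (pvDlen analis w).isEmpty <;> rfl

theorem pvA_eq (analis decod : List String) :
    get_comparison analis decod = pvCanon analis decod := by
  have h0 : get_comparison analis decod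
      = (((decod.foldl (pvStepA analis) PySem.Dict.empty).items.foldl pvStepB
           (decod.foldl (pvStepA analis) PySem.Dict.empty, ([] : List String))).2.foldl
          (fun d s => d.erase s)
          ((decod.foldl (pvStepA analis) PySem.Dict.empty).items.foldl pvStepB
           (decod.foldl (pvStepA analis) PySem.Dict.empty, ([] : List String))).1).items.map
          (fun kv => (kv.1, match kv.2 with | Sum.inr s => s | Sum.inl _ => "")) := rfl
  rw [h0]
  have hd : decod.foldl (pvStepA analis) PySem.Dict.empty
      = PySem.Dict.mk ((PySem.Set.ofList (decod.filter (pvGoodA analis))).map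
          (fun w => (w, Sum.inl (pvDlen analis w)))) := PySem.Dict.ext (pvPhase1 analis decod)
  rw [hd]
  set S := PySem.Set.ofList (decod.filter (pvGoodA analis)) with hS
  rw [show (PySem.Dict.mk (S.map (fun w => (w, Sum.inl (pvDlen analis w))))).items
      = S.map (fun w => (w, Sum.inl (pvDlen analis w))) from rfl]
  rw [pvPhase2 (pvDlen analis) S _ []]
  dsimp only
  have hkeys : (PySem.Dict.mk (S.map (fun w =>
      (w, (Sum.inl (pvDlen analis w) : List String ⊕ String))))).keys = S := by
    show (S.map (fun w => (w, (Sum.inl (pvDlen analis w) : List String ⊕ String)))).map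
        (fun p => p.1) = S
    rw [List.map_map]
    exact List.map_id' S
  rw [pvEraseFold]
  rw [pvInsertFold (pvQ (pvDlen analis)) (fun w => Sum.inr (pvH (pvDlen analis) w)) S _
      (by rw [hkeys]; exact PySem.Set.nodup_ofList _)
      (by intro v hv; rw [hkeys]; exact hv)]
  rw [show (PySem.Dict.mk (S.map (fun w => (w, Sum.inl (pvDlen analis w))))).items
      = S.map (fun w => (w, Sum.inl (pvDlen analis w))) from rfl]
  simp only [List.nil_append]
  rw [List.map_map]
  have hmap : S.map ((fun pr => if decide (pr.1 ∈ S) && pvQ (pvDlen analis) pr.1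
        then (pr.1, (fun w => Sum.inr (pvH (pvDlen analis) w)) pr.1) else pr)
        ∘ (fun w => (w, Sum.inl (pvDlen analis w))))
      = S.map (fun w => (w, if pvQ (pvDlen analis) w
          then (Sum.inr (pvH (pvDlen analis) w) : List String ⊕ String)
          else Sum.inl (pvDlen analis w))) := by
    apply List.map_congr_left
    intro w hw
    simp only [Function.comp_def]
    rw [decide_eq_true hw]
    by_cases hq : pvQ (pvDlen analis) w
    · rw [hq]; simp
    · have hqf : pvQ (pvDlen analis) w = false := by simpa using hq
      rw [hqf]; simp
  rw [hmap, List.filter_map]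
  have hfil : S.filter ((fun pr => !(S.filter (fun w => !pvQ (pvDlen analis) w)).contains pr.1)
        ∘ (fun w => (w, if pvQ (pvDlen analis) w
            then (Sum.inr (pvH (pvDlen analis) w) : List String ⊕ String)
            else Sum.inl (pvDlen analis w))))
      = S.filter (pvQ (pvDlen analis)) := by
    apply List.filter_congr
    intro w hw
    simp only [Function.comp_def]
    rw [List.contains_eq_mem]
    by_cases hq : pvQ (pvDlen analis) w
    · have hnm : w ∉ S.filter (fun x => !pvQ (pvDlen analis) x) := by
        intro hmem
        rcases List.mem_filter.mp hmem with ⟨-, hq2⟩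
        rw [hq] at hq2
        exact absurd hq2 (by simp)
      rw [decide_eq_false hnm, hq]
      rfl
    · have hqf : pvQ (pvDlen analis) w = false := by simpa using hq
      have hmem : w ∈ S.filter (fun x => !pvQ (pvDlen analis) x) :=
        List.mem_filter.mpr ⟨hw, by rw [hqf]; rfl⟩
      rw [decide_eq_true hmem, hqf]
      rfl
  rw [hfil, List.map_map]
  have hfinal : (S.filter (pvQ (pvDlen analis))).map
        ((fun kv => (kv.1, match kv.2 with | Sum.inr s => s | Sum.inl _ => ""))
          ∘ (fun w => (w, if pvQ (pvDlen analis) w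
              then (Sum.inr (pvH (pvDlen analis) w) : List String ⊕ String)
              else Sum.inl (pvDlen analis w))))
      = (S.filter (pvQ (pvDlen analis))).map
          (fun w => (w, PySem.List.pyGetD (pvLsig analis w) 0 "")) := by
    apply List.map_congr_left
    intro w hw
    have hq : pvQ (pvDlen analis) w = true := (List.mem_filter.mp hw).2
    simp only [Function.comp_def]
    rw [hq, if_pos rfl]
    show (w, pvH (pvDlen analis) w) = _
    unfold pvH
    rw [pvM_eq]
  rw [hfinal]
  have hgoal : S.filter (pvQ (pvDlen analis))
      = PySem.Set.ofList (decod.filter (pvGood analis)) := by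
    rw [hS, ← pvOfList_filter, List.filter_filter]
    congr 1
    apply List.filter_congr
    intro w _
    exact pvGood_eq analis w
  rw [hgoal]
  rfl

-- ===== VERDICT (by name: the statement is the Claim_ definition above) =====
theorem get_comparison_spec : Claim_equal_get_comparison := by
  intro analis decod _
  unfold Spec_get_comparison
  rw [pvA_eq, pvB_eq]
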